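-- pv_equiv track=rewrite | github.com/chaoren-maker/AIDC_check | app/remote/ib_batch.py | group_pairs_no_conflict
-- ===== SOURCE A (Python) =====
-- def group_pairs_no_conflict(
--     pairs: list[tuple[int, int]],
-- ) -> list[list[tuple[int, int]]]:
--     """Group pairs so that within each group no host_id appears twice.
--
--     This allows each group to be executed fully in parallel.
--     """
--     if not pairs:
--         return []
--
--     groups: list[list[tuple[int, int]]] = []
--
--     for pair in pairs:
--         s_id, c_id = pair
--         placed = False
--         for group in groups:
--             conflict = False
--             for existing_s, existing_c in group:
--                 if s_id in (existing_s, existing_c) or c_id in (existing_s, existing_c):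
--                     conflict = True
--                     break
--             if not conflict:
--                 group.append(pair)
--                 placed = True
--                 break
--         if not placed:
--             groups.append([pair])
--
--     return groups
-- ===== SOURCE B (Python) =====
-- def group_pairs_no_conflict(
--     pairs: list[tuple[int, int]],
-- ) -> list[list[tuple[int, int]]]:
--     """Group pairs so that within each group no host_id appears twice.
--
--     Inverted index: used[host_id] = set of group indices already containing it,
--     so placing a pair is a scan over integers, not over group contents.
--     """
--     groups: list[list[tuple[int, int]]] = []
--     used: dict[int, set[int]] = {}
--
--     for pair in pairs:
--         s_id, c_id = pair
--         forbidden = used.get(s_id, set()) | used.get(c_id, set())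
--         g = 0
--         while g in forbidden:
--             g += 1
--         if g == len(groups):
--             groups.append([pair])
--         else:
--             groups[g].append(pair)
--         used.setdefault(s_id, set()).add(g)
--         used.setdefault(c_id, set()).add(g)
--
--     return groups
-- ===== Notes on version B (the rewrite author's own statement) =====
-- stated objective: faster
-- what changed: Replaces A's rescan of every pair of every existing group per placement with an inverted index host_id -> set of group indices, so a pair is placed at the smallest integer index absent from used[s_id] | used[c_id].
import Mathlib
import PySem

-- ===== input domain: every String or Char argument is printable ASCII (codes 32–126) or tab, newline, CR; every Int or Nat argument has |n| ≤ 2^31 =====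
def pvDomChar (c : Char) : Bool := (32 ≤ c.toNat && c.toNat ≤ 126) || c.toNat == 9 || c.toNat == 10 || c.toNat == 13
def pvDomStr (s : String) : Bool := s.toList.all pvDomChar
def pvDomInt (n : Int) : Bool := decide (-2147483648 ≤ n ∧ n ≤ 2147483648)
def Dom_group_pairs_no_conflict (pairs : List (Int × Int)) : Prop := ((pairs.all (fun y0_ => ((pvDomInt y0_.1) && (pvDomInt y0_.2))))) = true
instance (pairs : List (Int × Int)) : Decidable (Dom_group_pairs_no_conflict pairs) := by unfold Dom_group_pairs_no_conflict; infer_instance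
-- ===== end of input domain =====

-- B replaces A's scan over every pair of every group with an inverted index host_id → set of
-- group indices, picking the smallest non-forbidden index (objective: faster first-fit placement).

-- ===== PORT A =====
-- inner loop: `for existing_s, existing_c in group: …` with the break-out `conflict` flag
def hasConflictA (s c : Int) : List (Int × Int) → Bool
  | [] => false
  | (es, ec) :: rest =>
    if (s = es ∨ s = ec) ∨ (c = es ∨ c = ec) then true else hasConflictA s c rest

-- middle loop: `for group in groups: …` with the `placed` flag; falling off the end appends [pair]
def placeA (p : Int × Int) : List (List (Int × Int)) → List (List (Int × Int))
  | [] => [[p]]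
  | g :: gs => if hasConflictA p.1 p.2 g then g :: placeA p gs else (g ++ [p]) :: gs

def group_pairs_no_conflict (pairs : List (Int × Int)) : List (List (Int × Int)) :=
  if pairs = [] then []
  else pairs.foldl (fun groups p => placeA p groups) []

-- ===== PORT B =====
-- `while g in forbidden: g += 1`; fuel len(groups)+1 only bounds the loop (forbidden holds
-- existing group indices, so an index ≤ len(groups) is always free), it changes no value
def findFreeB (forbidden : PySem.Set Int) : Nat → Nat → Nat
  | 0, g => g
  | fuel + 1, g =>
    if PySem.Set.contains forbidden (g : Int) then findFreeB forbidden fuel (g + 1) else g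

def stepB (st : List (List (Int × Int)) × PySem.Dict Int (PySem.Set Int)) (p : Int × Int) :
    List (List (Int × Int)) × PySem.Dict Int (PySem.Set Int) :=
  let s := p.1
  let c := p.2
  let forbidden := PySem.Set.union (st.2.getD s PySem.Set.empty) (st.2.getD c PySem.Set.empty)
  let g := findFreeB forbidden (st.1.length + 1) 0
  let groups := if g = st.1.length then st.1 ++ [[p]] else st.1.modify g (fun grp => grp ++ [p])
  -- `used.setdefault(h, set()).add(g)` = modify h with default ∅, adding g to the set
  let used := (st.2.modify s PySem.Set.empty (fun S => S.add (g : Int))).modify c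
      PySem.Set.empty (fun S => S.add (g : Int))
  (groups, used)

def group_pairs_no_conflict_alt (pairs : List (Int × Int)) : List (List (Int × Int)) :=
  (pairs.foldl stepB ([], PySem.Dict.empty)).1

-- ===== PRECONDITION & SPEC =====
def Spec_group_pairs_no_conflict (pairs : List (Int × Int)) (out : List (List (Int × Int))) : Prop := out = group_pairs_no_conflict_alt pairs
instance (pairs : List (Int × Int)) (out : List (List (Int × Int))) : Decidable (Spec_group_pairs_no_conflict pairs out) := by unfold Spec_group_pairs_no_conflict; infer_instance

-- ===== CLAIM (what is proved, stated in full; the proofs are below) =====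
def Claim_equal_group_pairs_no_conflict : Prop := ∀ (pairs : List (Int × Int)), Dom_group_pairs_no_conflict pairs → Spec_group_pairs_no_conflict pairs (group_pairs_no_conflict pairs)

-- ===== LEMMAS AND PROOFS =====

-- the inverted index is consistent with the groups: g ∈ used[h] iff some pair of groups[g] mentions h
def InvBA (groups : List (List (Int × Int))) (used : PySem.Dict Int (PySem.Set Int)) : Prop :=
  ∀ (h : Int) (g : Nat),
    ((g : Int) ∈ used.getD h PySem.Set.empty) ↔ ∃ pr ∈ groups.getD g [], pr.1 = h ∨ pr.2 = h

theorem hasConflictA_iff (s c : Int) (grp : List (Int × Int)) :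
    hasConflictA s c grp = true ↔
      ∃ pr ∈ grp, (pr.1 = s ∨ pr.2 = s) ∨ (pr.1 = c ∨ pr.2 = c) := by
  induction grp with
  | nil => simp [hasConflictA]
  | cons hd tl ih =>
    obtain ⟨es, ec⟩ := hd
    simp only [hasConflictA]
    split_ifs with h
    · simp only [true_iff]
      exact ⟨(es, ec), by simp, by tauto⟩
    · rw [ih]
      constructor
      · rintro ⟨pr, hm, hpr⟩; exact ⟨pr, by simp [hm], hpr⟩
      · rintro ⟨pr, hm, hpr⟩
        rcases List.mem_cons.mp hm with rfl | hm
        · exact absurd (by tauto) h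
        · exact ⟨pr, hm, hpr⟩

theorem findFreeB_spec (forbidden : PySem.Set Int) :
    ∀ (fuel a : Nat), (∃ j, a ≤ j ∧ j < a + fuel ∧ (j : Int) ∉ forbidden) →
      a ≤ findFreeB forbidden fuel a ∧ ((findFreeB forbidden fuel a : Int) ∉ forbidden) ∧
        ∀ j, a ≤ j → j < findFreeB forbidden fuel a → (j : Int) ∈ forbidden := by
  intro fuel
  induction fuel with
  | zero => intro a ⟨j, h1, h2, _⟩; omega
  | succ n ih =>
    intro a ⟨j, h1, h2, h3⟩
    by_cases hc : PySem.Set.contains forbidden (a : Int) = true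
    · have ha : (a : Int) ∈ forbidden := by
        simpa [PySem.Set.contains] using hc
      have hja : j ≠ a := by rintro rfl; exact h3 ha
      have := ih (a + 1) ⟨j, by omega, by omega, h3⟩
      have hres : findFreeB forbidden (n + 1) a = findFreeB forbidden n (a + 1) := by
        show (if PySem.Set.contains forbidden (a : Int) = true then findFreeB forbidden n (a + 1) else a) = _
        rw [if_pos hc]
      refine ⟨by omega, by rw [hres]; exact this.2.1, ?_⟩
      intro k hk1 hk2
      rw [hres] at hk2
      rcases Nat.eq_or_lt_of_le hk1 with rfl | hk1'
      · exact ha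
      · exact this.2.2 k (by omega) hk2
    · have hres : findFreeB forbidden (n + 1) a = a := by
        show (if PySem.Set.contains forbidden (a : Int) = true then findFreeB forbidden n (a + 1) else a) = _
        rw [if_neg hc]
      refine ⟨by omega, ?_, by omega⟩
      rw [hres]
      intro hmem
      exact hc (by simpa [PySem.Set.contains] using hmem)

theorem placeA_spec (p : Int × Int) :
    ∀ (groups : List (List (Int × Int))) (k : Nat),
      k ≤ groups.length →
      (∀ j, j < k → hasConflictA p.1 p.2 (groups.getD j []) = true) →
      (k < groups.length → hasConflictA p.1 p.2 (groups.getD k []) = false) →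
      placeA p groups =
        if k = groups.length then groups ++ [[p]] else groups.modify k (fun grp => grp ++ [p]) := by
  intro groups
  induction groups with
  | nil =>
    intro k hk _ _
    have hk0 : k = 0 := by simpa using hk
    subst hk0
    simp [placeA]
  | cons g gs ih =>
    intro k hk hlt hat
    cases k with
    | zero =>
      have hnc : hasConflictA p.1 p.2 g = false := by simpa using hat (by simp)
      simp [placeA, hnc, List.modify]
    | succ k' =>
      have hcg : hasConflictA p.1 p.2 g = true := by simpa using hlt 0 (by omega)
      have := ih k' (by simpa using hk)
        (fun j hj => by simpa using hlt (j + 1) (by omega))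
        (fun hlen => by simpa using hat (by simpa using hlen))
      simp only [placeA, hcg, if_true]
      rw [this]
      by_cases he : k' = gs.length
      · simp [he]
      · simp [he, List.modify]

-- uniform description of the updated group list at every index
theorem newgroups_getD (groups : List (List (Int × Int))) (p : Int × Int) (k : Nat)
    (hk : k ≤ groups.length) :
    ∀ g : Nat,
      (if k = groups.length then groups ++ [[p]]
        else groups.modify k (fun grp => grp ++ [p])).getD g [] =
        if g = k then groups.getD k [] ++ [p] else groups.getD g [] := by
  intro g
  by_cases he : k = groups.length
  · subst he
    simp only [if_true, List.getD_eq_getElem?_getD, List.getElem?_append]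
    by_cases hg : g = groups.length
    · subst hg
      simp
    · simp only [if_neg hg]
      by_cases hlt : g < groups.length
      · simp [hlt]
      · have h1 : groups[g]? = none := List.getElem?_eq_none (by omega)
        have h2 : ([[p]] : List (List (Int × Int)))[g - groups.length]? = none :=
          List.getElem?_eq_none (by simp; omega)
        simp [hlt, h2]
  · have hklt : k < groups.length := lt_of_le_of_ne hk he
    simp only [if_neg he, List.getD_eq_getElem?_getD, List.getElem?_modify]
    by_cases hg : g = k
    · subst hg
      have : groups[g]? = some (groups[g]'hklt) := List.getElem?_eq_getElem hklt
      simp [this]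
    · have hne : k ≠ g := fun h => hg h.symm
      cases h' : groups[g]? <;> simp [hg, hne]

-- membership in the updated inverted index, in closed form
theorem newused_mem (used : PySem.Dict Int (PySem.Set Int)) (s c : Int) (k : Nat) (x : Int)
    (g : Nat) :
    ((g : Int) ∈ ((used.modify s PySem.Set.empty (fun S => S.add (k : Int))).modify c
        PySem.Set.empty (fun S => S.add (k : Int))).getD x PySem.Set.empty) ↔
      ((g : Int) ∈ used.getD x PySem.Set.empty ∨ ((x = s ∨ x = c) ∧ g = k)) := by
  simp only [PySem.Dict.getD_modify]
  split_ifs with h1 h2 <;> simp_all [PySem.Set.mem_add]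

-- one step of A equals the groups of one step of B, and the invariant is preserved
theorem step_eq (groups : List (List (Int × Int))) (used : PySem.Dict Int (PySem.Set Int))
    (p : Int × Int) (hinv : InvBA groups used) :
    placeA p groups = (stepB (groups, used) p).1 ∧ InvBA (stepB (groups, used) p).1 (stepB (groups, used) p).2 := by
  obtain ⟨s, c⟩ := p
  set forbidden := PySem.Set.union (used.getD s PySem.Set.empty) (used.getD c PySem.Set.empty) with hforb
  -- forbidden indices are exactly the conflicting group indices
  have hchar : ∀ g : Nat, ((g : Int) ∈ forbidden) ↔ hasConflictA s c (groups.getD g []) = true := by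
    intro g
    rw [hforb, PySem.Set.mem_union, hasConflictA_iff]
    rw [hinv s g, hinv c g]
    constructor
    · rintro (⟨pr, hm, hpr⟩ | ⟨pr, hm, hpr⟩) <;> exact ⟨pr, hm, by tauto⟩
    · rintro ⟨pr, hm, hpr⟩
      rcases hpr with h | h
      · exact Or.inl ⟨pr, hm, h⟩
      · exact Or.inr ⟨pr, hm, h⟩
  have hlenfree : ((groups.length : Int) ∉ forbidden) := by
    rw [hchar]
    simp [List.getD_eq_getElem?_getD, hasConflictA]
  set k := findFreeB forbidden (groups.length + 1) 0 with hkdef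
  have hspec := findFreeB_spec forbidden (groups.length + 1) 0
    ⟨groups.length, by omega, by omega, hlenfree⟩
  have hkfree : ((k : Int) ∉ forbidden) := hspec.2.1
  have hkmin : ∀ j, j < k → (j : Int) ∈ forbidden := fun j hj => hspec.2.2 j (by omega) hj
  have hkle : k ≤ groups.length := by
    by_contra hgt
    exact hlenfree (hkmin groups.length (by omega))
  have hplace : placeA (s, c) groups =
      (if k = groups.length then groups ++ [[(s, c)]]
        else groups.modify k (fun grp => grp ++ [(s, c)])) := by
    apply placeA_spec (s, c) groups k hkle
    · intro j hj; exact (hchar j).mp (hkmin j hj)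
    · intro _; exact Bool.eq_false_iff.mpr (fun ht => hkfree ((hchar k).mpr ht))
  constructor
  · rw [hplace]; rfl
  · -- invariant preservation
    intro x gg
    have hstep1 : (stepB (groups, used) (s, c)).1 =
        (if k = groups.length then groups ++ [[(s, c)]]
          else groups.modify k (fun grp => grp ++ [(s, c)])) := rfl
    have hstep2 : (stepB (groups, used) (s, c)).2 =
        (used.modify s PySem.Set.empty (fun S => S.add (k : Int))).modify c
          PySem.Set.empty (fun S => S.add (k : Int)) := rfl
    rw [hstep1, hstep2, newused_mem, newgroups_getD groups (s, c) k hkle gg]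
    by_cases hg : gg = k
    · rw [if_pos hg, hg, hinv x k]
      constructor
      · rintro (⟨pr, hm, hpr⟩ | ⟨hxc, _⟩)
        · exact ⟨pr, List.mem_append_left _ hm, hpr⟩
        · exact ⟨(s, c), List.mem_append_right _ (by simp), by tauto⟩
      · rintro ⟨pr, hm, hpr⟩
        rcases List.mem_append.mp hm with hm | hm
        · exact Or.inl ⟨pr, hm, hpr⟩
        · simp only [List.mem_singleton] at hm
          subst hm
          exact Or.inr ⟨by tauto, rfl⟩
    · rw [if_neg hg, hinv x gg]
      simp [hg]

theorem loop_eq : ∀ (pairs : List (Int × Int)) (groups : List (List (Int × Int)))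
    (used : PySem.Dict Int (PySem.Set Int)), InvBA groups used →
    pairs.foldl (fun groups p => placeA p groups) groups = (pairs.foldl stepB (groups, used)).1 := by
  intro pairs
  induction pairs with
  | nil => intro groups used _; rfl
  | cons p rest ih =>
    intro groups used hinv
    have := step_eq groups used p hinv
    simp only [List.foldl_cons]
    rw [this.1]
    exact ih _ _ this.2

theorem inv_init : InvBA [] PySem.Dict.empty := by
  intro h g
  simp [PySem.Dict.getD_empty, PySem.Set.empty]

-- ===== VERDICT (by name: the statement is the Claim_ definition above) =====
theorem group_pairs_no_conflict_spec : Claim_equal_group_pairs_no_conflict := by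
  intro pairs _
  show group_pairs_no_conflict pairs = group_pairs_no_conflict_alt pairs
  unfold group_pairs_no_conflict group_pairs_no_conflict_alt
  by_cases hp : pairs = []
  · subst hp; rfl
  · rw [if_neg hp]
    exact loop_eq pairs [] PySem.Dict.empty inv_init
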